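-- pv_equiv track=rewrite | github.com/deecamp2019-group20/CNN_PokerNet | data/DataLoader.py | have_bomb_in_handcard
-- ===== SOURCE A (Python) =====
-- def have_bomb_in_handcard(handcard):
--     r""" Find whether there is bomb or rocket among the handcard
--
--     Args:
--         handcard: a list splited handcard numbers
--
--     Return:
--         Boolen
--     """
--     card_ranks = [
--         '3', '4', '5', '6', '7', '8', '9', '10',
--         'J', 'Q', 'K', 'A', '2', 'X', 'D'
--     ]
--     for rank in card_ranks:
--         if handcard.count(rank) == 4:
--             return True
--
--     if 'X' in handcard and 'D' in handcard:
--         return True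
--
--     return False
-- ===== SOURCE B (Python) =====
-- def have_bomb_in_handcard(handcard):
--     ranks = ('3', '4', '5', '6', '7', '8', '9', '10',
--              'J', 'Q', 'K', 'A', '2', 'X', 'D')
--     # Peel off the whole group of cards equal to the first card, one group per step.
--     cards = handcard
--     has_x = False
--     has_d = False
--     while cards:
--         head = cards[0]
--         group_size = 1 + sum(1 for c in cards[1:] if c == head)
--         if group_size == 4 and head in ranks:
--             return True
--         cards = [c for c in cards[1:] if c != head]
--         has_x = has_x or head == 'X'
--         has_d = has_d or head == 'D'
--     return has_x and has_d
-- ===== Notes on version B (the rewrite author's own statement) =====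
-- stated objective: alternative
-- what changed: B is a group-peeling algorithm: each step partitions the remaining hand on its first card, tests that whole group's size against 4, and continues on the remainder while accumulating joker flags, instead of A's 15 fixed-rank .count scans plus two membership scans.
import Mathlib
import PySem

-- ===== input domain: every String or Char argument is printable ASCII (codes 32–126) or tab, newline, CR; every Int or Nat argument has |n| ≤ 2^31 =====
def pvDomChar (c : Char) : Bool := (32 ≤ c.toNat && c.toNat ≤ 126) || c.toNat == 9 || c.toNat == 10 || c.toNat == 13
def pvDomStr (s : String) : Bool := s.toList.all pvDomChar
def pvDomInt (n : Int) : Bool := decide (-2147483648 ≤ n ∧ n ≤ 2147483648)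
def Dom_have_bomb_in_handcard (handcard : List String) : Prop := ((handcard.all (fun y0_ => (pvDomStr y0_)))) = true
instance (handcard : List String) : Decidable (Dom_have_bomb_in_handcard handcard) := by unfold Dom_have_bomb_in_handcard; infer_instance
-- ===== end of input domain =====

-- B recursively peels off the whole group of cards equal to the first card and tests that group's size, instead of A's 15 fixed-rank count scans; objective: alternative.

-- ===== PORT A =====
def have_bomb_in_handcard (handcard : List String) : Bool :=
  let card_ranks : List String :=
    ["3", "4", "5", "6", "7", "8", "9", "10", "J", "Q", "K", "A", "2", "X", "D"]
  -- 'for rank in card_ranks: if handcard.count(rank) == 4: return True'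
  if card_ranks.any (fun rank => PySem.List.count handcard rank == 4) then
    true
  else if handcard.contains "X" && handcard.contains "D" then
    true
  else
    false

-- ===== PORT B =====
-- 'def peel(cards, has_x, has_d)': peel off the group of cards equal to cards[0]
def have_bomb_peel (ranks : List String) : List String → Bool → Bool → Bool
  | [], has_x, has_d => has_x && has_d
  | head :: t, has_x, has_d =>
    let group_size : Int := 1 + ((t.filter (fun c => c == head)).length : Int)
    if group_size == 4 && ranks.contains head then
      true
    else
      have_bomb_peel ranks (t.filter (fun c => !(c == head)))
        (has_x || head == "X") (has_d || head == "D")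
termination_by l _ _ => l.length
decreasing_by
  simp only [List.length_cons, List.length_unattach]
  exact Nat.lt_succ_of_le (le_trans (List.length_filter_le _ _) (by simp))

def have_bomb_in_handcard_alt (handcard : List String) : Bool :=
  have_bomb_peel
    ["3", "4", "5", "6", "7", "8", "9", "10", "J", "Q", "K", "A", "2", "X", "D"]
    handcard false false

-- ===== PRECONDITION & SPEC =====
def Spec_have_bomb_in_handcard (handcard : List String) (out : Bool) : Prop := out = have_bomb_in_handcard_alt handcard
instance (handcard : List String) (out : Bool) : Decidable (Spec_have_bomb_in_handcard handcard out) := by unfold Spec_have_bomb_in_handcard; infer_instance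

-- ===== CLAIM (what is proved, stated in full; the proofs are below) =====
def Claim_equal_have_bomb_in_handcard : Prop := ∀ (handcard : List String), Dom_have_bomb_in_handcard handcard → Spec_have_bomb_in_handcard handcard (have_bomb_in_handcard handcard)

-- ===== LEMMAS AND PROOFS =====

-- Counts of cards other than the peeled head are unchanged by the peel.
theorem pv_count_peel (head : String) (t : List String) (c : String) (hc : c ≠ head) :
    (t.filter (fun x => !(x == head))).count c = (head :: t).count c := by
  rw [List.count_eq_length_filter, List.count_eq_length_filter, List.filter_filter]
  simp only [List.filter_cons, beq_iff_eq]
  rw [if_neg (by simpa using fun h => hc h.symm)]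
  congr 1
  apply List.filter_congr
  intro x _
  by_cases hx' : x = c
  · simp [hx', hc]
  · simp [hx']

-- Membership in the peeled remainder, together with the head, is membership in the whole list.
theorem pv_mem_peel (head : String) (t : List String) (v : String) :
    (head = v ∨ v ∈ t.filter (fun x => !(x == head))) ↔ v ∈ head :: t := by
  simp only [List.mem_cons, List.mem_filter, Bool.not_eq_eq_eq_not, Bool.not_true,
    beq_eq_false_iff_ne, ne_eq]
  constructor
  · rintro (h | ⟨hm, _⟩)
    · exact Or.inl h.symm
    · exact Or.inr hm
  · rintro (h | hm)
    · exact Or.inl h.symm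
    · by_cases hh : v = head
      · exact Or.inl hh.symm
      · exact Or.inr ⟨hm, hh⟩

-- Characterisation of the peel loop: it answers "some card of l occurs exactly 4 times and is a
-- legal rank, or (with the accumulated flags) both jokers occur".
theorem have_bomb_peel_eq (ranks : List String) (n : Nat) (l : List String) (hl : l.length ≤ n)
    (hx hd : Bool) :
    have_bomb_peel ranks l hx hd
      = (l.any (fun c => (l.count c == 4) && ranks.contains c)
          || ((hx || l.contains "X") && (hd || l.contains "D"))) := by
  induction n generalizing l hx hd with
  | zero =>
      have : l = [] := List.length_eq_zero_iff.mp (Nat.le_zero.mp hl)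
      subst this
      rw [have_bomb_peel]
      simp
  | succ n ih =>
      cases l with
      | nil => rw [have_bomb_peel]; simp
      | cons head t =>
        rw [have_bomb_peel]
        have hgroup : (head :: t).count head = 1 + (t.filter (fun c => c == head)).length := by
          rw [List.count_cons_self, List.count_eq_length_filter]
          omega
        by_cases hb : ((1 + ((t.filter (fun c => c == head)).length : Int) == 4
            && ranks.contains head) = true)
        · rw [if_pos hb]
          have hb' := (Bool.and_eq_true _ _).mp hb
          have hI := beq_iff_eq.mp hb'.1
          have h4 : (head :: t).count head = 4 := by omega
          symm
          apply Bool.or_eq_true_iff.mpr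
          left
          apply List.any_eq_true.mpr
          refine ⟨head, by simp, ?_⟩
          simp only [h4, beq_self_eq_true, Bool.true_and]
          exact hb'.2
        · rw [if_neg hb]
          rw [ih _ (by
            have := List.length_filter_le (fun x => !(x == head)) t
            simpa using le_trans this (Nat.le_of_succ_le_succ hl))]
          have hheadcount : ¬ ((head :: t).count head = 4 ∧ head ∈ ranks) := by
            rintro ⟨h4, hr⟩
            apply hb
            apply (Bool.and_eq_true _ _).mpr
            refine ⟨?_, by simpa using hr⟩
            rw [beq_iff_eq]
            omega
          rw [Bool.eq_iff_iff]
          simp only [Bool.or_eq_true, Bool.and_eq_true, List.any_eq_true, beq_iff_eq,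
            List.contains_eq_mem, decide_eq_true_eq]
          constructor
          · rintro (⟨c, hm, h4, hr⟩ | ⟨hX, hD⟩)
            · have hc : c ≠ head := by
                have := (List.mem_filter.mp hm).2
                simpa using this
              refine Or.inl ⟨c, (pv_mem_peel head t c).mp (Or.inr hm), ?_, hr⟩
              rw [← pv_count_peel head t c hc]; exact h4
            · refine Or.inr ⟨?_, ?_⟩
              · rcases hX with (h | h) | h
                · exact Or.inl h
                · exact Or.inr ((pv_mem_peel head t "X").mp (Or.inl h))
                · exact Or.inr ((pv_mem_peel head t "X").mp (Or.inr h))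
              · rcases hD with (h | h) | h
                · exact Or.inl h
                · exact Or.inr ((pv_mem_peel head t "D").mp (Or.inl h))
                · exact Or.inr ((pv_mem_peel head t "D").mp (Or.inr h))
          · rintro (⟨c, hm, h4, hr⟩ | ⟨hX, hD⟩)
            · by_cases hc : c = head
              · exact absurd ⟨hc ▸ h4, hc ▸ hr⟩ hheadcount
              · refine Or.inl ⟨c, ?_, by rw [pv_count_peel head t c hc]; exact h4, hr⟩
                rcases (pv_mem_peel head t c).mpr hm with h | h
                · exact absurd h.symm hc
                · exact h
            · refine Or.inr ⟨?_, ?_⟩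
              · rcases hX with h | h
                · exact Or.inl (Or.inl h)
                · rcases (pv_mem_peel head t "X").mpr h with h' | h'
                  · exact Or.inl (Or.inr h')
                  · exact Or.inr h'
              · rcases hD with h | h
                · exact Or.inl (Or.inl h)
                · rcases (pv_mem_peel head t "D").mpr h with h' | h'
                  · exact Or.inl (Or.inr h')
                  · exact Or.inr h'

-- A's rank-list scan equals the existence of a card of the hand counted exactly 4 among ranks.
theorem pv_ranks_scan_eq (ranks : List String) (h : List String) :
    ranks.any (fun rank => PySem.List.count h rank == 4)
      = h.any (fun c => (h.count c == 4) && ranks.contains c) := by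
  rw [Bool.eq_iff_iff]
  simp only [List.any_eq_true, PySem.List.count_eq, Bool.and_eq_true, beq_iff_eq,
    List.contains_eq_mem, decide_eq_true_eq]
  constructor
  · rintro ⟨r, hr, hc⟩
    have hcn : h.count r = 4 := by exact_mod_cast hc
    have : 0 < h.count r := by omega
    exact ⟨r, List.count_pos_iff.mp this, hcn, hr⟩
  · rintro ⟨c, _, hc, hk⟩
    exact ⟨c, hk, by exact_mod_cast hc⟩

-- ===== VERDICT (by name: the statement is the Claim_ definition above) =====
theorem have_bomb_in_handcard_spec : Claim_equal_have_bomb_in_handcard := by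
  intro h _
  unfold Spec_have_bomb_in_handcard have_bomb_in_handcard have_bomb_in_handcard_alt
  rw [have_bomb_peel_eq _ h.length h le_rfl, ← pv_ranks_scan_eq]
  simp only [Bool.false_or]
  split_ifs with h1 h2
  · rw [h1, Bool.true_or]
  · rw [Bool.not_eq_true] at h1
    rw [h1, Bool.false_or, h2]
  · rw [Bool.not_eq_true] at h1 h2
    rw [h1, Bool.false_or, h2]
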